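-- pv_equiv track=rewrite | github.com/yejin0901/Codingtest | 프로그래머스/1/42862. 체육복/체육복.py | solution
-- ===== SOURCE A (Python) =====
-- def solution(n, lost, reserve):
--     spare_stolen = set(lost) & set(reserve)
--
--     lost = sorted(list(filter(lambda x: x not in spare_stolen, lost)))
--     reserve = sorted(list(filter(lambda x: x not in spare_stolen, reserve)))
--
--     for i in lost:
--         if (i-1) in reserve:
--             reserve.remove(i-1)
--
--
--         elif  (i+1) in reserve:
--             reserve.remove(i+1)
--
--         else:
--             n-=1
--
--     return n
-- ===== SOURCE B (Python) =====
-- def solution(n, lost, reserve):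
--     both = set(lost) & set(reserve)
--     L = sorted(x for x in lost if x not in both)
--     R = sorted(x for x in reserve if x not in both)
--     i = j = miss = 0
--     while i < len(L):
--         if j < len(R) and R[j] < L[i] - 1:
--             j += 1
--         elif j < len(R) and R[j] <= L[i] + 1:
--             i += 1
--             j += 1
--         else:
--             miss += 1
--             i += 1
--     return n - miss
-- ===== Notes on version B (the rewrite author's own statement) =====
-- stated objective: faster
-- what changed: B sorts both filtered lists once and resolves all lendings in a single two-pointer merge pass (advance the reserve pointer past useless small values, match when the heads differ by one, otherwise count a miss), replacing A's per-lost-student membership tests and list.remove scans over a shrinking reserve list.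
import Mathlib
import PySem

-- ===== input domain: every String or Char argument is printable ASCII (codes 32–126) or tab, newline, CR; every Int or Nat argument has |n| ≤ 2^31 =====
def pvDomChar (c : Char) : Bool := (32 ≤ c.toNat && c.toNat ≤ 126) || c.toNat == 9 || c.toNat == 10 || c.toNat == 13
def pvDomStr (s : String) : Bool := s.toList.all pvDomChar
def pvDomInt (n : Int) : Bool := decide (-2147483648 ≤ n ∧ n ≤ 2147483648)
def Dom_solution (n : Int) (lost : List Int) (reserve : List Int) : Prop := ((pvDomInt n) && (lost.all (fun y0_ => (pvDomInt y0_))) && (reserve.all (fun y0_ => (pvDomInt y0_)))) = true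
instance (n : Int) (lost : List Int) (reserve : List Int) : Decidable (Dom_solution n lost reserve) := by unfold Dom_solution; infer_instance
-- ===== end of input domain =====

-- B resolves all lendings in one two-pointer merge of the two sorted filtered lists,
-- removing A's per-lost-student membership tests and list.remove scans (faster by the merge pass).

-- ===== PORT A =====
-- A's loop body over state (n, reserve)
def astep (st : Int × List Int) (i : Int) : Int × List Int :=
  if (i - 1) ∈ st.2 then (st.1, (PySem.List.remove? st.2 (i - 1)).getD st.2)
  else if (i + 1) ∈ st.2 then (st.1, (PySem.List.remove? st.2 (i + 1)).getD st.2)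
  else (st.1 - 1, st.2)

def solution (n : Int) (lost : List Int) (reserve : List Int) : Int :=
  let spare := PySem.Set.inter (PySem.Set.ofList lost) (PySem.Set.ofList reserve)
  let lost' := PySem.List.sorted (lost.filter (fun x => !(PySem.Set.contains spare x))) (fun x => x) false
  let reserve' := PySem.List.sorted (reserve.filter (fun x => !(PySem.Set.contains spare x))) (fun x => x) false
  (lost'.foldl astep (n, reserve')).1

-- ===== PORT B =====
-- B's while loop over the indices i, j: structural recursion on the two list suffixes
def mergeMiss : List Int → List Int → Int → Int
  | [], _, miss => miss
  | _ :: ls, [], miss => mergeMiss ls [] (miss + 1)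
  | i :: ls, a :: rs, miss =>
    if a < i - 1 then mergeMiss (i :: ls) rs miss
    else if a ≤ i + 1 then mergeMiss ls rs miss
    else mergeMiss ls (a :: rs) (miss + 1)
termination_by ls rs _ => (ls.length, rs.length)

def solution_alt (n : Int) (lost : List Int) (reserve : List Int) : Int :=
  let both := PySem.Set.inter (PySem.Set.ofList lost) (PySem.Set.ofList reserve)
  let ls := PySem.List.sorted (lost.filter (fun x => !(PySem.Set.contains both x))) (fun x => x) false
  let rs := PySem.List.sorted (reserve.filter (fun x => !(PySem.Set.contains both x))) (fun x => x) false
  n - mergeMiss ls rs 0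

-- ===== PRECONDITION & SPEC =====
def Spec_solution (n : Int) (lost : List Int) (reserve : List Int) (out : Int) : Prop := out = solution_alt n lost reserve
instance (n : Int) (lost : List Int) (reserve : List Int) (out : Int) : Decidable (Spec_solution n lost reserve out) := by unfold Spec_solution; infer_instance

-- ===== CLAIM (what is proved, stated in full; the proofs are below) =====
def Claim_equal_solution : Prop := ∀ (n : Int) (lost : List Int) (reserve : List Int), Dom_solution n lost reserve → Spec_solution n lost reserve (solution n lost reserve)

-- ===== LEMMAS AND PROOFS =====

-- Core invariant.  A's remaining reserve is d ++ r where d is the prefix B's merge has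
-- already skipped (every element of d is < i - 1 for every pending lost value i, so A can
-- never use it), r is B's remaining reserve suffix; both lists are sorted and the pending
-- lost values never occur in the reserve.  Then A's misses equal B's misses.
theorem core (ls rs : List Int) (miss : Int) : ∀ (d : List Int) (n : Int),
    ls.Pairwise (· ≤ ·) → rs.Pairwise (· ≤ ·) →
    (∀ x ∈ d, ∀ i ∈ ls, x < i - 1) →
    (∀ i ∈ ls, i ∉ rs) →
    (ls.foldl astep (n, d ++ rs)).1 + mergeMiss ls rs miss = n + miss := by
  induction ls, rs, miss using mergeMiss.induct with
  | case1 rs miss =>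
    intro d n _ _ _ _
    simp [mergeMiss]
  | case2 i ls miss ih =>
    intro d n hL _ hd hdisj
    have h1 : (i - 1) ∉ d := fun h => by have := hd _ h i (by simp); omega
    have h2 : (i + 1) ∉ d := fun h => by have := hd _ h i (by simp); omega
    simp only [List.foldl_cons, List.append_nil] at *
    rw [show astep (n, d) i = (n - 1, d) by simp [astep, h1, h2]]
    have := ih d (n - 1) hL.of_cons (by simp) ?_ (by simp)
    · rw [show mergeMiss (i :: ls) [] miss = mergeMiss ls [] (miss + 1) by simp [mergeMiss]]
      omega
    · intro x hx i' hi'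
      have := hd x hx i (by simp)
      have : i ≤ i' := (List.pairwise_cons.mp hL).1 i' hi'
      omega
  | case3 i ls a rs miss ha ih =>
    -- a < i - 1 : B skips a; A's d grows by a
    intro d n hL hR hd hdisj
    have := ih (d ++ [a]) n hL hR.of_cons ?_ ?_
    · rw [show mergeMiss (i :: ls) (a :: rs) miss = mergeMiss (i :: ls) rs miss by
        simp [mergeMiss, ha]]
      simpa using this
    · intro x hx i' hi'
      rcases List.mem_append.mp hx with h | h
      · exact hd x h i' hi'
      · have hx' : x = a := by simpa using h
        have : i ≤ i' := by
          rcases List.mem_cons.mp hi' with h' | h'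
          · omega
          · exact (List.pairwise_cons.mp hL).1 i' h'
        omega
    · intro i' hi' hmem
      exact hdisj i' hi' (by simp [hmem])
  | case4 i ls a rs miss ha hb ih =>
    -- i - 1 ≤ a ≤ i + 1, a ≠ i : B matches; A removes a from its reserve
    intro d n hL hR hd hdisj
    have hai : a ≠ i := fun h => hdisj i (by simp) (by simp [h])
    have h1 : (i - 1) ∉ d := fun h => by have := hd _ h i (by simp); omega
    have h2 : (i + 1) ∉ d := fun h => by have := hd _ h i (by simp); omega
    have hRA : ∀ x ∈ rs, a ≤ x := (List.pairwise_cons.mp hR).1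
    have hstep : astep (n, d ++ a :: rs) i = (n, d ++ rs) := by
      by_cases hcase : a = i - 1
      · have hmem : (i - 1) ∈ d ++ a :: rs := by simp [hcase]
        simp only [astep, if_pos hmem]
        rw [PySem.List.remove?_eq_some_erase _ _ hmem, Option.getD_some,
          List.erase_append_right _ h1, ← hcase, List.erase_cons_head]
      · have haeq : a = i + 1 := by omega
        have hm1 : (i - 1) ∉ d ++ a :: rs := by
          intro h
          rcases List.mem_append.mp h with h | h
          · exact h1 h
          · rcases List.mem_cons.mp h with h | h
            · omega
            · have := hRA _ h; omega
        have hmem : (i + 1) ∈ d ++ a :: rs := by simp [haeq]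
        simp only [astep, if_neg hm1, if_pos hmem]
        rw [PySem.List.remove?_eq_some_erase _ _ hmem, Option.getD_some,
          List.erase_append_right _ h2, ← haeq, List.erase_cons_head]
    simp only [List.foldl_cons, hstep]
    have := ih d n hL.of_cons hR.of_cons ?_ ?_
    · rw [show mergeMiss (i :: ls) (a :: rs) miss = mergeMiss ls rs miss by
        simp [mergeMiss, ha, hb]]
      exact this
    · intro x hx i' hi'
      have := hd x hx i (by simp)
      have : i ≤ i' := (List.pairwise_cons.mp hL).1 i' hi'
      omega
    · intro i' hi' hmem
      exact hdisj i' (by simp [hi']) (by simp [hmem])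
  | case5 i ls a rs miss ha hb ih =>
    -- a > i + 1 : neither i-1 nor i+1 available; A and B both miss
    intro d n hL hR hd hdisj
    have h1 : (i - 1) ∉ d := fun h => by have := hd _ h i (by simp); omega
    have h2 : (i + 1) ∉ d := fun h => by have := hd _ h i (by simp); omega
    have hRA : ∀ x ∈ rs, a ≤ x := (List.pairwise_cons.mp hR).1
    have hm1 : (i - 1) ∉ d ++ a :: rs := by
      intro h
      rcases List.mem_append.mp h with h | h
      · exact h1 h
      · rcases List.mem_cons.mp h with h | h
        · omega
        · have := hRA _ h; omega
    have hm2 : (i + 1) ∉ d ++ a :: rs := by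
      intro h
      rcases List.mem_append.mp h with h | h
      · exact h2 h
      · rcases List.mem_cons.mp h with h | h
        · omega
        · have := hRA _ h; omega
    have hstep : astep (n, d ++ a :: rs) i = (n - 1, d ++ a :: rs) := by
      simp [astep, hm1, hm2]
    simp only [List.foldl_cons, hstep]
    have := ih d (n - 1) hL.of_cons hR ?_ ?_
    · rw [show mergeMiss (i :: ls) (a :: rs) miss = mergeMiss ls (a :: rs) (miss + 1) by
        simp [mergeMiss, ha, hb]]
      omega
    · intro x hx i' hi'
      have := hd x hx i (by simp)
      have : i ≤ i' := (List.pairwise_cons.mp hL).1 i' hi'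
      omega
    · intro i' hi'
      exact hdisj i' (by simp [hi'])

-- ===== VERDICT (by name: the statement is the Claim_ definition above) =====
theorem solution_spec : Claim_equal_solution := by
  intro n lost reserve _
  unfold Spec_solution solution solution_alt
  dsimp only
  set both := PySem.Set.inter (PySem.Set.ofList lost) (PySem.Set.ofList reserve) with hboth
  set ls := PySem.List.sorted (lost.filter (fun x => !(PySem.Set.contains both x))) (fun x => x) false with hls
  set rs := PySem.List.sorted (reserve.filter (fun x => !(PySem.Set.contains both x))) (fun x => x) false with hrs
  have hL : ls.Pairwise (· ≤ ·) :=
    PySem.List.sorted_pairwise (lost.filter (fun x => !(PySem.Set.contains both x))) (fun x => x)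
  have hR : rs.Pairwise (· ≤ ·) :=
    PySem.List.sorted_pairwise (reserve.filter (fun x => !(PySem.Set.contains both x))) (fun x => x)
  have hdisj : ∀ i ∈ ls, i ∉ rs := by
    intro i hi hmem
    rw [hls, PySem.List.mem_sorted, List.mem_filter] at hi
    rw [hrs, PySem.List.mem_sorted, List.mem_filter] at hmem
    have hib : i ∈ both := by
      rw [hboth]
      exact (PySem.Set.mem_inter _ _ _).mpr
        ⟨(PySem.Set.mem_ofList _ _).mpr hi.1, (PySem.Set.mem_ofList _ _).mpr hmem.1⟩
    rcases hi with ⟨_, h2⟩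
    simp at h2
    exact h2 hib
  have := core ls rs 0 [] n hL hR (by simp) hdisj
  simp only [List.nil_append] at this
  omega
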